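-- pv_equiv track=rewrite | github.com/JawadKotaichh/Codeforces | CSES/Sorting and searching/ConcertTickets.py | concertTickets
-- ===== SOURCE A (Python) =====
-- import bisect
--
-- def concertTickets(price,pay):
--     maxPrice=sorted(price)
--     answerL=[]
--     for i in range(len(pay)):
--
--         itr=bisect.bisect_right(maxPrice,pay[i])
--
--         if itr==0:
--             answerL.append(-1)
--         else:
--             itr-=1
--             answerL.append(maxPrice[itr])
--             maxPrice.remove(maxPrice[itr])
--
--     return "\n".join(map(str, answerL))
-- ===== SOURCE B (Python) =====
-- import bisect
--
-- def concertTickets(price, pay):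
--     # Sort once; answer each customer by predecessor-find-and-delete on indices:
--     # par[j] points toward the largest still-available index <= j (path-compressed).
--     ps = sorted(price)
--     n = len(ps)
--     par = list(range(n))
--     out = []
--     for x in pay:
--         i = bisect.bisect_right(ps, x) - 1
--         # find root: largest available index <= i (or -1)
--         r = i
--         while r >= 0 and par[r] != r:
--             r = par[r]
--         # path compression
--         j = i
--         while j >= 0 and j != r:
--             nxt = par[j]
--             par[j] = r
--             j = nxt
--         if r < 0:
--             out.append(-1)
--         else:
--             out.append(ps[r])
--             par[r] = r - 1
--     return "\n".join(map(str, out))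
-- ===== Notes on version B (the rewrite author's own statement) =====
-- stated objective: faster
-- what changed: Replaces A's per-query bisect on a shrinking sorted list with O(n) list.remove by a union-find 'next available index' structure over the once-sorted prices: each query does one bisect on the fixed array plus a path-compressed predecessor find-and-delete.
import Mathlib
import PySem

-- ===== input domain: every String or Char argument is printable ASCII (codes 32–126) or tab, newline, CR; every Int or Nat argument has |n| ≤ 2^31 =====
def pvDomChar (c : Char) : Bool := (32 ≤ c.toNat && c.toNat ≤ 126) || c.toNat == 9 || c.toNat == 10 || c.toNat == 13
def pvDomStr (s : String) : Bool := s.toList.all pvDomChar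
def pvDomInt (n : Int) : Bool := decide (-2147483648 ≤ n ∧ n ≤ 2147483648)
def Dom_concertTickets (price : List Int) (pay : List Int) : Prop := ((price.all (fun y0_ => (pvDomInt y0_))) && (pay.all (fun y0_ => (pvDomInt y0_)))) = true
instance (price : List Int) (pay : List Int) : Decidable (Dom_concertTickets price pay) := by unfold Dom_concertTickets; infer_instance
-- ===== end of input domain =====

-- B replaces A's per-query bisect + O(n) list.remove on a shrinking sorted list by a
-- union-find "largest still-available index" structure over the once-sorted prices (faster).

-- ===== PORT A =====
def concertTickets (price : List Int) (pay : List Int) : String :=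
  let maxPrice := PySem.List.sorted price (fun v => v)
  let st := (PySem.List.pyRange 0 (pay.length : Int) 1).foldl (fun (st : List Int × List Int) i =>
      let mp := st.1
      let answerL := st.2
      let itr := PySem.List.bisectRight mp (PySem.List.pyGetD pay i 0)
      if itr = 0 then (mp, answerL ++ [(-1 : Int)])
      else
        let itr := itr - 1
        let v := PySem.List.pyGetD mp ((itr : Nat) : Int) 0
        -- maxPrice.remove(maxPrice[itr]): v ∈ mp always (itr < len mp), so remove
        -- never raises and the .getD default is unreachable
        ((PySem.List.remove? mp v).getD mp, answerL ++ [v]))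
    (maxPrice, ([] : List Int))
  PySem.Str.join "\n" (st.2.map PySem.Int.toStr)

-- ===== PORT B =====
-- while r >= 0 and par[r] != r: r = par[r]   (fuel-guarded loop; fuel n+1 always suffices)
def ctFindRoot (fuel : Nat) (par : List Int) (r : Int) : Int :=
  match fuel with
  | 0 => r
  | fuel + 1 =>
    if 0 ≤ r ∧ PySem.List.pyGetD par r 0 ≠ r then ctFindRoot fuel par (PySem.List.pyGetD par r 0)
    else r

-- j = i; while j >= 0 and j != r: nxt = par[j]; par[j] = r; j = nxt
def ctCompress (fuel : Nat) (par : List Int) (j r : Int) : List Int :=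
  match fuel with
  | 0 => par
  | fuel + 1 =>
    if 0 ≤ j ∧ j ≠ r then
      ctCompress fuel (PySem.List.pySetD par j r) (PySem.List.pyGetD par j 0) r
    else par

def concertTickets_alt (price : List Int) (pay : List Int) : String :=
  let ps := PySem.List.sorted price (fun v => v)
  let n := ps.length
  let par : List Int := PySem.List.pyRange 0 (n : Int) 1
  let st := pay.foldl (fun (st : List Int × List Int) x =>
      let par := st.1
      let out := st.2
      let i : Int := (PySem.List.bisectRight ps x : Int) - 1
      let r := ctFindRoot (n + 1) par i
      let par := ctCompress (n + 1) par i r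
      if r < 0 then (par, out ++ [(-1 : Int)])
      else (PySem.List.pySetD par r (r - 1), out ++ [PySem.List.pyGetD ps r 0]))
    (par, ([] : List Int))
  PySem.Str.join "\n" (st.2.map PySem.Int.toStr)

-- ===== PRECONDITION & SPEC =====
def Spec_concertTickets (price : List Int) (pay : List Int) (out : String) : Prop := out = concertTickets_alt price pay
instance (price : List Int) (pay : List Int) (out : String) : Decidable (Spec_concertTickets price pay out) := by unfold Spec_concertTickets; infer_instance

-- ===== CLAIM (what is proved, stated in full; the proofs are below) =====
def Claim_equal_concertTickets : Prop := ∀ (price : List Int) (pay : List Int), Dom_concertTickets price pay → Spec_concertTickets price pay (concertTickets price pay)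

-- ===== LEMMAS AND PROOFS =====

lemma ctEq_append_last {l : List Nat} {a : Nat} (hs : l.Pairwise (· < ·)) (ha : a ∈ l)
    (hmax : ∀ k ∈ l, k ≤ a) : ∃ l', l = l' ++ [a] := by
  induction l with
  | nil => simp at ha
  | cons c t ih =>
    cases t with
    | nil =>
      simp at ha; exact ⟨[], by simp [ha]⟩
    | cons d t' =>
      have hlt : c < d := (List.pairwise_cons.1 hs).1 d (by simp)
      have hat : a ∈ d :: t' := by
        rcases List.mem_cons.1 ha with h | h
        · exfalso; have := hmax d (by simp); omega
        · exact h
      obtain ⟨l', hl'⟩ := ih (List.pairwise_cons.1 hs).2 hat (fun k hk => hmax k (by simp [hk]))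
      exact ⟨c :: l', by simp [hl']⟩

lemma ctErase_sorted (u w : List Int) (v : Int) (h : (u ++ v :: w).Pairwise (· ≤ ·)) :
    (u ++ v :: w).erase v = u ++ w := by
  induction u with
  | nil => simp
  | cons a u' ih =>
    by_cases hav : a = v
    · subst hav
      have hall : ∀ e ∈ u', e = a := by
        intro e he
        have h1 : a ≤ e := (List.pairwise_cons.1 h).1 e (by simp [he])
        have h2 : e ≤ a :=
          (List.pairwise_append.1 (List.pairwise_cons.1 h).2).2.2 e he a (by simp)
        omega
      have hrep : u' = List.replicate u'.length a := List.eq_replicate_of_mem hall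
      have key : ∀ m : Nat, List.replicate m a ++ a :: w = a :: (List.replicate m a ++ w) := by
        intro m
        induction m with
        | zero => simp
        | succ m ihm => simp only [List.replicate_succ, List.cons_append, ihm]
      have : u' ++ a :: w = a :: (u' ++ w) := by
        conv_lhs => rw [hrep]
        conv_rhs => rw [hrep]
        exact key u'.length
      simp only [List.cons_append, List.erase_cons_head, this]
    · rw [List.cons_append, List.erase_cons_tail (by simp [hav])]
      rw [ih (List.pairwise_cons.1 h).2]
      simp

lemma ctBisect_split (u w : List Int) (x : Int) (h : (u ++ w).Pairwise (· ≤ ·))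
    (hu : ∀ a ∈ u, a ≤ x) (hw : ∀ a ∈ w, x < a) :
    PySem.List.bisectRight (u ++ w) x = u.length := by
  obtain ⟨hb, h1, h2⟩ := PySem.List.bisectRight_spec (u ++ w) x h
  set b := PySem.List.bisectRight (u ++ w) x with hbdef
  rcases Nat.lt_trichotomy b u.length with hlt | heq | hgt
  · exfalso
    have hj : b < (u ++ w).length := by simp; omega
    have := h2 b hj le_rfl
    have hget : (u ++ w)[b] = u[b]'hlt := List.getElem_append_left hlt
    have := hu (u[b]'hlt) (List.getElem_mem _)
    omega
  · exact heq
  · exfalso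
    cases w with
    | nil => simp at hb; omega
    | cons w0 w' =>
      have hj : u.length < (u ++ w0 :: w').length := by simp
      have := h1 u.length hj hgt
      have hget : (u ++ w0 :: w')[u.length] = w0 := by
        rw [List.getElem_append_right le_rfl]
        simp
      have := hw w0 (by simp)
      omega

def ctAvail (par : List Int) (k : Nat) : Bool := par.getD k 0 == (k : Int)

def ctIdx (par : List Int) : List Nat := (List.range par.length).filter (fun k => ctAvail par k)

def ctAvailL (ps par : List Int) : List Int := (ctIdx par).map (fun k => ps.getD k 0)

def ctInv (par : List Int) : Prop := ∀ k : Nat, k < par.length →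
  -1 ≤ par.getD k 0 ∧ par.getD k 0 ≤ (k : Int) ∧
  ∀ m : Nat, par.getD k 0 < (m : Int) → m < k → ctAvail par m = false

def ctIsRoot (par : List Int) (i r : Int) : Prop :=
  -1 ≤ r ∧ r ≤ i ∧ (0 ≤ r → r.toNat < par.length ∧ ctAvail par r.toNat = true) ∧
  ∀ k : Nat, r < (k : Int) → (k : Int) ≤ i → k < par.length → ctAvail par k = false

lemma ctGetD_set (par : List Int) (n k : Nat) (v : Int) (hn : n < par.length) :
    (par.set n v).getD k 0 = if k = n then v else par.getD k 0 := by
  simp only [List.getD]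
  split_ifs with hk
  · subst hk; simp [hn]
  · rw [List.getElem?_set_ne (by omega : n ≠ k)]

lemma ctTake_spec (par : List Int) (r : Int) (hInv : ctInv par) (hr : 0 ≤ r)
    (hrn : r.toNat < par.length) (hav : ctAvail par r.toNat = true) :
    (PySem.List.pySetD par r (r - 1)).length = par.length ∧
    ctInv (PySem.List.pySetD par r (r - 1)) ∧
    (∀ k : Nat, ctAvail (PySem.List.pySetD par r (r - 1)) k = (ctAvail par k && !(k == r.toNat))) := by
  rw [PySem.List.pySetD_of_nonneg par _ hr]
  have hrc : ((r.toNat : Nat) : Int) = r := Int.toNat_of_nonneg hr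
  have hget : ∀ k : Nat, (par.set r.toNat (r - 1)).getD k 0 =
      if k = r.toNat then r - 1 else par.getD k 0 := fun k => ctGetD_set par _ k _ hrn
  have havail : ∀ k : Nat, ctAvail (par.set r.toNat (r - 1)) k = (ctAvail par k && !(k == r.toNat)) := by
    intro k
    simp only [ctAvail, hget]
    by_cases hk : k = r.toNat
    · subst hk
      rw [if_pos rfl, hrc]
      simp
    · simp [hk]
  refine ⟨by simp, ?_, havail⟩
  intro k hk'
  simp only [List.length_set] at hk'
  obtain ⟨h1, h2, h3⟩ := hInv k hk'
  rw [hget]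
  by_cases hkr : k = r.toNat
  · subst hkr
    rw [if_pos rfl]
    refine ⟨by omega, by omega, ?_⟩
    intro m hm1 hm2
    exfalso
    omega
  · rw [if_neg hkr]
    refine ⟨h1, h2, ?_⟩
    intro m hm1 hm2
    rw [havail m]
    by_cases hmr : m = r.toNat
    · simp [hmr]
    · have hb : (m == r.toNat) = false := by simp [hmr]
      rw [hb]
      simp only [Bool.not_false, Bool.and_true]
      exact h3 m hm1 hm2

lemma ctFindRoot_spec (par : List Int) (hInv : ctInv par) :
    ∀ (fuel : Nat) (i : Int), -1 ≤ i → i < (par.length : Int) → (i + 1).toNat < fuel →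
    ctIsRoot par i (ctFindRoot fuel par i) := by
  intro fuel
  induction fuel with
  | zero => intro i _ _ hf; omega
  | succ fuel ih =>
    intro i hi1 hi2 hf
    simp only [ctFindRoot]
    by_cases hc : 0 ≤ i ∧ PySem.List.pyGetD par i 0 ≠ i
    · rw [if_pos hc]
      obtain ⟨hi0, hne⟩ := hc
      have hglt : i.toNat < par.length := by omega
      have hgd : PySem.List.pyGetD par i 0 = par.getD i.toNat 0 :=
        PySem.List.pyGetD_of_nonneg par 0 hi0
      rw [hgd] at hne ⊢
      have hcast : ((i.toNat : Nat) : Int) = i := Int.toNat_of_nonneg hi0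
      obtain ⟨g1, g2, g3⟩ := hInv i.toNat hglt
      have hlt : par.getD i.toNat 0 < i := by omega
      have hroot := ih (par.getD i.toNat 0) g1 (by omega) (by omega)
      obtain ⟨r1, r2, r3, r4⟩ := hroot
      refine ⟨r1, by omega, r3, ?_⟩
      intro k hk1 hk2 hk3
      by_cases hk4 : (k : Int) ≤ par.getD i.toNat 0
      · exact r4 k hk1 hk4 hk3
      · push_neg at hk4
        by_cases hk5 : k = i.toNat
        · subst hk5
          have hne' : par.getD i.toNat 0 ≠ ((i.toNat : Nat) : Int) := by rw [hcast]; exact hne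
          simp only [ctAvail]
          exact beq_eq_false_iff_ne.2 hne'
        · exact g3 k hk4 (by omega)
    · rw [if_neg hc]
      push_neg at hc
      by_cases hi0 : 0 ≤ i
      · have heq := hc hi0
        rw [PySem.List.pyGetD_of_nonneg par 0 hi0] at heq
        have hcast : ((i.toNat : Nat) : Int) = i := Int.toNat_of_nonneg hi0
        refine ⟨by omega, le_rfl, fun _ => ⟨by omega, ?_⟩, fun k hk1 hk2 _ => by omega⟩
        simp only [ctAvail, hcast, heq]
        simp
      · refine ⟨by omega, le_rfl, fun h => by omega, fun k hk1 hk2 _ => by omega⟩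

lemma ctCompress_spec (r : Int) :
    ∀ (fuel : Nat) (par : List Int) (j : Int), ctInv par → ctIsRoot par j r →
    j < (par.length : Int) → (j + 1).toNat < fuel →
    (ctCompress fuel par j r).length = par.length ∧ ctInv (ctCompress fuel par j r) ∧
    (∀ k : Nat, ctAvail (ctCompress fuel par j r) k = ctAvail par k) := by
  intro fuel
  induction fuel with
  | zero => intro par j _ _ _ hf; omega
  | succ fuel ih =>
    intro par j hInv hRoot hjlen hf
    simp only [ctCompress]
    by_cases hc : 0 ≤ j ∧ j ≠ r
    · rw [if_pos hc]
      obtain ⟨hj0, hjr⟩ := hc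
      obtain ⟨hr1, hr2, hr3, hr4⟩ := hRoot
      have hcast : ((j.toNat : Nat) : Int) = j := Int.toNat_of_nonneg hj0
      have hjn : j.toNat < par.length := by omega
      have hrltj : r < j := lt_of_le_of_ne hr2 (fun h => hjr h.symm)
      have havj : ctAvail par j.toNat = false := hr4 j.toNat (by omega) (by omega) hjn
      obtain ⟨g1, g2, g3⟩ := hInv j.toNat hjn
      have hgd : PySem.List.pyGetD par j 0 = par.getD j.toNat 0 :=
        PySem.List.pyGetD_of_nonneg par 0 hj0
      set nxt := par.getD j.toNat 0 with hnxt
      have hnej : nxt ≠ j := by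
        intro h
        rw [ctAvail, ← hnxt, h, hcast] at havj
        simp at havj
      have hnltj : nxt < j := by omega
      have hrlenxt : r ≤ nxt := by
        by_contra hcon
        push_neg at hcon
        have hr0 : 0 ≤ r := by omega
        obtain ⟨hrn, hravail⟩ := hr3 hr0
        have := g3 r.toNat (by omega) (by omega)
        rw [this] at hravail
        simp at hravail
      rw [PySem.List.pySetD_of_nonneg par _ hj0, hgd]
      set par' := par.set j.toNat r with hpar'
      have hget' : ∀ k : Nat, par'.getD k 0 = if k = j.toNat then r else par.getD k 0 :=
        fun k => ctGetD_set par _ k _ hjn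
      have hlen' : par'.length = par.length := by simp [hpar']
      have havail' : ∀ k : Nat, ctAvail par' k = ctAvail par k := by
        intro k
        simp only [ctAvail, hget']
        by_cases hk : k = j.toNat
        · subst hk
          rw [if_pos rfl, hcast, ← hnxt]
          rw [beq_eq_false_iff_ne.2 (Ne.symm hjr), beq_eq_false_iff_ne.2 hnej]
        · rw [if_neg hk]
      have hInv' : ctInv par' := by
        intro k hk
        rw [hlen'] at hk
        obtain ⟨i1, i2, i3⟩ := hInv k hk
        rw [hget']
        by_cases hkj : k = j.toNat
        · subst hkj
          rw [if_pos rfl]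
          refine ⟨hr1, by omega, ?_⟩
          intro m hm1 hm2
          rw [havail' m]
          exact hr4 m hm1 (by omega) (by omega)
        · rw [if_neg hkj]
          refine ⟨i1, i2, ?_⟩
          intro m hm1 hm2
          rw [havail' m]
          exact i3 m hm1 hm2
      have hRoot' : ctIsRoot par' nxt r := by
        refine ⟨hr1, hrlenxt, ?_, ?_⟩
        · intro hr0
          obtain ⟨hrn, hravail⟩ := hr3 hr0
          exact ⟨by omega, by rw [havail' r.toNat]; exact hravail⟩
        · intro k hk1 hk2 hk3
          rw [havail' k]
          rw [hlen'] at hk3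
          exact hr4 k hk1 (by omega) hk3
      obtain ⟨c1, c2, c3⟩ := ih par' nxt hInv' hRoot' (by omega) (by omega)
      refine ⟨by rw [c1, hlen'], c2, ?_⟩
      intro k
      rw [c3 k, havail' k]
    · rw [if_neg hc]
      exact ⟨rfl, hInv, fun _ => rfl⟩

def ctStepA (st : List Int × List Int) (x : Int) : List Int × List Int :=
  let mp := st.1
  let itr := PySem.List.bisectRight mp x
  if itr = 0 then (mp, st.2 ++ [(-1 : Int)])
  else
    let itr := itr - 1
    let v := PySem.List.pyGetD mp ((itr : Nat) : Int) 0
    ((PySem.List.remove? mp v).getD mp, st.2 ++ [v])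

def ctStepB (ps : List Int) (st : List Int × List Int) (x : Int) : List Int × List Int :=
  let i : Int := (PySem.List.bisectRight ps x : Int) - 1
  let r := ctFindRoot (ps.length + 1) st.1 i
  let par := ctCompress (ps.length + 1) st.1 i r
  if r < 0 then (par, st.2 ++ [(-1 : Int)])
  else (PySem.List.pySetD par r (r - 1), st.2 ++ [PySem.List.pyGetD ps r 0])

lemma ctAvailL_congr (ps par par' : List Int) (hl : par'.length = par.length)
    (h : ∀ k, ctAvail par' k = ctAvail par k) : ctAvailL ps par' = ctAvailL ps par := by
  unfold ctAvailL ctIdx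
  rw [hl]
  congr 1
  exact List.filter_congr (fun k _ => h k)

lemma ctMap_pairwise (ps : List Int) (hps : ps.Pairwise (· ≤ ·)) (l : List Nat)
    (hl : l.Pairwise (· < ·)) (hbound : ∀ k ∈ l, k < ps.length) :
    (l.map (fun k => ps.getD k 0)).Pairwise (· ≤ ·) := by
  rw [List.pairwise_map]
  refine (hl.imp_of_mem ?_)
  intro a b ha hb hab
  have hb' : b < ps.length := hbound b hb
  have ha' : a < ps.length := hbound a ha
  rw [List.getD_eq_getElem ps 0 ha', List.getD_eq_getElem ps 0 hb']
  exact List.pairwise_iff_getElem.1 hps a b ha' hb' hab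

lemma ctStep_spec (ps par ans : List Int) (x : Int)
    (hps : ps.Pairwise (· ≤ ·)) (hlen : par.length = ps.length) (hInv : ctInv par) :
    (ctStepA (ctAvailL ps par, ans) x).2 = (ctStepB ps (par, ans) x).2 ∧
    (ctStepA (ctAvailL ps par, ans) x).1 = ctAvailL ps (ctStepB ps (par, ans) x).1 ∧
    ctInv (ctStepB ps (par, ans) x).1 ∧ (ctStepB ps (par, ans) x).1.length = ps.length := by
  obtain ⟨hb, hble, hbgt⟩ := PySem.List.bisectRight_spec ps x hps
  set b := PySem.List.bisectRight ps x with hbdef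
  set n := ps.length with hn
  set i : Int := (b : Int) - 1 with hidef
  set g : Nat → Int := fun k => ps.getD k 0 with hg
  -- find root and compress
  have hi1 : -1 ≤ i := by omega
  have hi2 : i < (par.length : Int) := by omega
  have hRoot := ctFindRoot_spec par hInv (n + 1) i hi1 hi2 (by omega)
  set r := ctFindRoot (n + 1) par i with hr
  obtain ⟨hr1, hr2, hr3, hr4⟩ := hRoot
  have hComp := ctCompress_spec r (n + 1) par i hInv ⟨hr1, hr2, hr3, hr4⟩ hi2 (by omega)
  set par' := ctCompress (n + 1) par i r with hpar'
  obtain ⟨hC1, hC2, hC3⟩ := hComp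
  have hmpEq : ctAvailL ps par' = ctAvailL ps par := ctAvailL_congr ps par par' hC1 hC3
  -- decomposition of the available indices around b
  set K₁ : List Nat := (List.range b).filter (fun k => ctAvail par k) with hK1
  set K₂ : List Nat := ((List.range (n - b)).map (fun m => b + m)).filter (fun k => ctAvail par k) with hK2
  have hsplit : ctIdx par = K₁ ++ K₂ := by
    unfold ctIdx
    rw [hlen]
    rw [show n = b + (n - b) by omega, List.range_add, List.filter_append]
  have hK1mem : ∀ k ∈ K₁, k < b ∧ ctAvail par k = true := by
    intro k hk
    rw [hK1, List.mem_filter, List.mem_range] at hk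
    exact ⟨hk.1, hk.2⟩
  have hK2mem : ∀ k ∈ K₂, b ≤ k ∧ k < n ∧ ctAvail par k = true := by
    intro k hk
    rw [hK2, List.mem_filter, List.mem_map] at hk
    obtain ⟨⟨m, hm, hmk⟩, hav⟩ := hk
    rw [List.mem_range] at hm
    refine ⟨by omega, by omega, hav⟩
  
  have hKpw : (K₁ ++ K₂).Pairwise (· < ·) := by
    rw [← hsplit]
    exact List.Pairwise.filter _ (List.pairwise_lt_range)
  have hKbound : ∀ k ∈ K₁ ++ K₂, k < ps.length := by
    intro k hk
    rcases List.mem_append.1 hk with h | h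
    · have := hK1mem k h; omega
    · have := hK2mem k h; omega
  have hmp : ctAvailL ps par = K₁.map g ++ K₂.map g := by
    rw [ctAvailL, hsplit, List.map_append]
  have hmppw : (K₁.map g ++ K₂.map g).Pairwise (· ≤ ·) := by
    rw [← List.map_append]
    exact ctMap_pairwise ps hps (K₁ ++ K₂) hKpw hKbound
  have hgd : ∀ (k : Nat) (hk : k < ps.length), g k = ps[k]'hk := by
    intro k hk
    exact List.getD_eq_getElem ps 0 hk
  have hK1le : ∀ v ∈ K₁.map g, v ≤ x := by
    intro v hv
    rw [List.mem_map] at hv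
    obtain ⟨k, hk, hkv⟩ := hv
    obtain ⟨hkb, _⟩ := hK1mem k hk
    have hklen : k < ps.length := by omega
    rw [← hkv, hgd k hklen]
    exact hble k hklen hkb
  have hK2gt : ∀ v ∈ K₂.map g, x < v := by
    intro v hv
    rw [List.mem_map] at hv
    obtain ⟨k, hk, hkv⟩ := hv
    obtain ⟨hkb, hkn, _⟩ := hK2mem k hk
    have hklen : k < ps.length := by omega
    rw [← hkv, hgd k hklen]
    exact hbgt k hklen hkb
  have hitr : PySem.List.bisectRight (ctAvailL ps par) x = (K₁.map g).length := by
    rw [hmp]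
    exact ctBisect_split (K₁.map g) (K₂.map g) x hmppw hK1le hK2gt
  by_cases hrneg : r < 0
  · -- no affordable ticket: K₁ is empty, both sides append -1 and keep the state
    have hK1nil : K₁ = [] := by
      rw [List.eq_nil_iff_forall_not_mem]
      intro k hk
      obtain ⟨hkb, hkav⟩ := hK1mem k hk
      have := hr4 k (by omega) (by omega) (by omega)
      rw [this] at hkav
      exact absurd hkav (by simp)
    have hitr0 : PySem.List.bisectRight (ctAvailL ps par) x = 0 := by
      rw [hitr, hK1nil]
      rfl
    have hA : ctStepA (ctAvailL ps par, ans) x = (ctAvailL ps par, ans ++ [(-1 : Int)]) := by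
      show (if PySem.List.bisectRight (ctAvailL ps par) x = 0
            then (ctAvailL ps par, ans ++ [(-1 : Int)])
            else ((PySem.List.remove? (ctAvailL ps par)
                    (PySem.List.pyGetD (ctAvailL ps par) ((PySem.List.bisectRight (ctAvailL ps par) x - 1 : Nat) : Int) 0)).getD (ctAvailL ps par),
                  ans ++ [PySem.List.pyGetD (ctAvailL ps par) ((PySem.List.bisectRight (ctAvailL ps par) x - 1 : Nat) : Int) 0])) = _
      rw [if_pos hitr0]
    have hB : ctStepB ps (par, ans) x = (par', ans ++ [(-1 : Int)]) := by
      show (if r < 0 then (par', ans ++ [(-1 : Int)])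
            else (PySem.List.pySetD par' r (r - 1), ans ++ [PySem.List.pyGetD ps r 0])) = _
      rw [if_pos hrneg]
    rw [hA, hB]
    exact ⟨rfl, hmpEq.symm, hC2, by show par'.length = ps.length; omega⟩
  · -- take ps[r]: A erases that value, B marks index r taken
    push_neg at hrneg
    obtain ⟨hrnlen, hrav⟩ := hr3 hrneg
    set rn := r.toNat with hrn
    have hrcast : ((rn : Nat) : Int) = r := Int.toNat_of_nonneg hrneg
    have hrnb : rn < b := by omega
    have hrnK1 : rn ∈ K₁ := by
      rw [hK1, List.mem_filter, List.mem_range]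
      exact ⟨hrnb, hrav⟩
    have hmax : ∀ k ∈ K₁, k ≤ rn := by
      intro k hk
      obtain ⟨hkb, hkav⟩ := hK1mem k hk
      by_contra hcon
      have := hr4 k (by omega) (by omega) (by omega)
      rw [this] at hkav
      exact absurd hkav (by simp)
    obtain ⟨K₁', hK1eq⟩ := ctEq_append_last (List.Pairwise.sublist (List.sublist_append_left _ _) hKpw) hrnK1 hmax
    have hK1'lt : ∀ k ∈ K₁', k < rn := by
      intro k hk
      have := (List.pairwise_append.1 (hK1eq ▸ (List.Pairwise.sublist (List.sublist_append_left K₁ K₂) hKpw))).2.2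
      exact this k hk rn (by simp)
    have hmpshape : ctAvailL ps par = K₁'.map g ++ g rn :: K₂.map g := by
      rw [hmp, hK1eq, List.map_append]
      simp
    have hitrlen : PySem.List.bisectRight (ctAvailL ps par) x = K₁'.length + 1 := by
      rw [hitr, hK1eq]
      simp
    have hitrne : PySem.List.bisectRight (ctAvailL ps par) x ≠ 0 := by omega
    have hval : PySem.List.pyGetD (ctAvailL ps par)
        ((PySem.List.bisectRight (ctAvailL ps par) x - 1 : Nat) : Int) 0 = g rn := by
      rw [hitrlen, Nat.add_sub_cancel, PySem.List.pyGetD_of_nonneg _ _ (by omega), Int.toNat_natCast, hmpshape]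
      rw [List.getD_eq_getElem _ 0 (by simp)]
      rw [List.getElem_append_right (by simp)]
      simp
    have hmem : g rn ∈ ctAvailL ps par := by
      rw [hmpshape]
      exact List.mem_append.2 (Or.inr (by simp))
    have hremove : (PySem.List.remove? (ctAvailL ps par) (g rn)).getD (ctAvailL ps par) =
        K₁'.map g ++ K₂.map g := by
      rw [PySem.List.remove?_eq_some_erase _ _ hmem, Option.getD_some]
      rw [hmpshape]
      exact ctErase_sorted (K₁'.map g) (K₂.map g) (g rn) (hmpshape ▸ (hmp ▸ hmppw))
    have hTake := ctTake_spec par' r hC2 hrneg (by omega) (by rw [hC3]; exact hrav)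
    obtain ⟨hT1, hT2, hT3⟩ := hTake
    set par'' := PySem.List.pySetD par' r (r - 1) with hpar''
    have havail'' : ∀ k : Nat, ctAvail par'' k = (ctAvail par k && !(k == rn)) := by
      intro k
      rw [hT3 k, hC3 k]
    have hmp'' : ctAvailL ps par'' = K₁'.map g ++ K₂.map g := by
      unfold ctAvailL ctIdx
      rw [hT1, hC1, hlen]
      rw [List.filter_congr (fun k _ => havail'' k)]
      rw [List.filter_congr (fun (k : Nat) _ => Bool.and_comm (ctAvail par k) (!(k == rn)))]
      rw [show n = b + (n - b) by omega, List.range_add, List.filter_append]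
      rw [← List.filter_filter, ← List.filter_filter]
      rw [← hK1, ← hK2]
      have e1 : K₁.filter (fun k => !(k == rn)) = K₁' := by
        rw [hK1eq, List.filter_append]
        rw [List.filter_eq_self.2 (fun k hk => by
          simp only [Bool.not_eq_eq_eq_not, Bool.not_true, beq_eq_false_iff_ne]
          exact Nat.ne_of_lt (hK1'lt k hk))]
        simp
      have e2 : K₂.filter (fun k => !(k == rn)) = K₂ := by
        rw [List.filter_eq_self]
        intro k hk
        obtain ⟨hkb, _, _⟩ := hK2mem k hk
        simp only [Bool.not_eq_eq_eq_not, Bool.not_true, beq_eq_false_iff_ne]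
        omega
      rw [e1, e2, List.map_append]
    have hpsr : PySem.List.pyGetD ps r 0 = g rn := by
      rw [PySem.List.pyGetD_of_nonneg _ _ hrneg]
    have hA : ctStepA (ctAvailL ps par, ans) x = (K₁'.map g ++ K₂.map g, ans ++ [g rn]) := by
      show (if PySem.List.bisectRight (ctAvailL ps par) x = 0
            then (ctAvailL ps par, ans ++ [(-1 : Int)])
            else ((PySem.List.remove? (ctAvailL ps par)
                    (PySem.List.pyGetD (ctAvailL ps par) ((PySem.List.bisectRight (ctAvailL ps par) x - 1 : Nat) : Int) 0)).getD (ctAvailL ps par),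
                  ans ++ [PySem.List.pyGetD (ctAvailL ps par) ((PySem.List.bisectRight (ctAvailL ps par) x - 1 : Nat) : Int) 0])) = _
      rw [if_neg hitrne, hval, hremove]
    have hB : ctStepB ps (par, ans) x = (par'', ans ++ [g rn]) := by
      show (if r < 0 then (par', ans ++ [(-1 : Int)])
            else (PySem.List.pySetD par' r (r - 1), ans ++ [PySem.List.pyGetD ps r 0])) = _
      rw [if_neg (by omega : ¬ r < 0), hpsr, ← hpar'']
    rw [hA, hB]
    exact ⟨rfl, hmp''.symm, hT2, by show par''.length = ps.length; omega⟩

lemma ctFold (ps : List Int) (hps : ps.Pairwise (· ≤ ·)) :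
    ∀ (pay : List Int) (par ansA ansB : List Int), par.length = ps.length → ctInv par → ansA = ansB →
    (pay.foldl ctStepA (ctAvailL ps par, ansA)).2 = (pay.foldl (ctStepB ps) (par, ansB)).2 := by
  intro pay
  induction pay with
  | nil =>
    intro par aA aB hl hI hab
    simpa using hab
  | cons x t ih =>
    intro par aA aB hl hI hab
    subst hab
    obtain ⟨h1, h2, h3, h4⟩ := ctStep_spec ps par aA x hps hl hI
    simp only [List.foldl_cons]
    rw [show ctStepA (ctAvailL ps par, aA) x
        = (ctAvailL ps (ctStepB ps (par, aA) x).1, (ctStepB ps (par, aA) x).2) from Prod.ext h2 h1]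
    exact ih (ctStepB ps (par, aA) x).1 _ _ h4 h3 rfl

lemma ctMain (price pay : List Int) :
    concertTickets price pay = concertTickets_alt price pay := by
  set ps0 := PySem.List.sorted price (fun v => v) with hps0def
  have hps0 : ps0.Pairwise (· ≤ ·) := PySem.List.sorted_pairwise price (fun v => v)
  set n := ps0.length with hn
  set par0 : List Int := PySem.List.pyRange 0 (n : Int) 1 with hpar0
  have hpar0eq : par0 = (List.range n).map (fun k => ((k : Nat) : Int)) := by
    rw [hpar0, PySem.List.pyRange_one]
    simp
  have hlen0 : par0.length = n := by rw [hpar0eq]; simp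
  have hget0 : ∀ k : Nat, k < n → par0.getD k 0 = (k : Int) := by
    intro k hk
    rw [hpar0eq, List.getD_eq_getElem _ 0 (by simp [hk])]
    simp
  have hInv0 : ctInv par0 := by
    intro k hk
    rw [hlen0] at hk
    rw [hget0 k hk]
    refine ⟨by omega, le_rfl, ?_⟩
    intro m h1 h2
    exfalso
    omega
  have hmp0 : ctAvailL ps0 par0 = ps0 := by
    unfold ctAvailL ctIdx
    rw [hlen0]
    rw [List.filter_eq_self.2 (fun k hk => by
      rw [List.mem_range] at hk
      unfold ctAvail
      rw [hget0 k hk]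
      exact beq_self_eq_true _)]
    apply List.ext_getElem (by simp [hn])
    intro k h1 h2
    simp only [List.getElem_map, List.getElem_range]
    exact List.getD_eq_getElem ps0 0 (by simpa using h2)
  have hfold : (pay.foldl ctStepA (ps0, ([] : List Int))).2
      = (pay.foldl (ctStepB ps0) (par0, ([] : List Int))).2 := by
    have h := ctFold ps0 hps0 pay par0 [] [] (by omega) hInv0 rfl
    rw [hmp0] at h
    exact h
  show PySem.Str.join "\n" (((PySem.List.pyRange 0 ((pay.length : Nat) : Int) 1).foldl
        (fun (st : List Int × List Int) i => ctStepA st (PySem.List.pyGetD pay i 0))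
        (ps0, ([] : List Int))).2.map PySem.Int.toStr)
      = PySem.Str.join "\n" ((pay.foldl (ctStepB ps0) (par0, ([] : List Int))).2.map PySem.Int.toStr)
  rw [PySem.List.foldl_pyRange_zero_pyGetD' pay 0 ctStepA (ps0, ([] : List Int))]
  rw [hfold]

-- ===== VERDICT (by name: the statement is the Claim_ definition above) =====
theorem concertTickets_spec : Claim_equal_concertTickets := by
  intro price pay _
  unfold Spec_concertTickets
  exact ctMain price pay
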